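-- pv_equiv track=rewrite | github.com/AgiMa-AI/12 | openhands/langchain_router/integration.py | _is_babyagi_task
-- ===== SOURCE A (Python) =====
-- def _is_babyagi_task(user_input: str) -> bool:
--     """
--     Check if a user input should be handled by BabyAGI.
--
--     Args:
--         user_input: The user's input
--
--     Returns:
--         True if the input should be handled by BabyAGI, False otherwise
--     """
--     # Check for BabyAGI keywords
--     babyagi_keywords = [
--         "organize", "summarize", "extract", "filter",
--         "create prompt", "update prompt", "delete prompt", "list prompts",
--         "create rule", "update rule", "delete rule", "list rules"
--     ]
--
--     for keyword in babyagi_keywords: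
--         if keyword in user_input.lower():
--             return True
--
--     return False
-- ===== SOURCE B (Python) =====
-- _BABYAGI_KEYWORDS = [
--     "organize", "summarize", "extract", "filter",
--     "create prompt", "update prompt", "delete prompt", "list prompts",
--     "create rule", "update rule", "delete rule", "list rules"
-- ]
--
--
-- def _is_babyagi_task(user_input: str) -> bool:
--     # Position-driven scan: one pass over the lowercased input, at each
--     # position test whether any keyword starts there.
--     s = user_input.lower()
--     return any(s.startswith(k, i)
--                for i in range(len(s) + 1)
--                for k in _BABYAGI_KEYWORDS)
-- ===== Notes on version B (the rewrite author's own statement) =====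
-- stated objective: alternative
-- what changed: Replaces A's keyword-driven loop of whole-string substring-membership tests with a single position-driven scan of the lowercased input that tests startswith for each keyword at every position.
import Mathlib
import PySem

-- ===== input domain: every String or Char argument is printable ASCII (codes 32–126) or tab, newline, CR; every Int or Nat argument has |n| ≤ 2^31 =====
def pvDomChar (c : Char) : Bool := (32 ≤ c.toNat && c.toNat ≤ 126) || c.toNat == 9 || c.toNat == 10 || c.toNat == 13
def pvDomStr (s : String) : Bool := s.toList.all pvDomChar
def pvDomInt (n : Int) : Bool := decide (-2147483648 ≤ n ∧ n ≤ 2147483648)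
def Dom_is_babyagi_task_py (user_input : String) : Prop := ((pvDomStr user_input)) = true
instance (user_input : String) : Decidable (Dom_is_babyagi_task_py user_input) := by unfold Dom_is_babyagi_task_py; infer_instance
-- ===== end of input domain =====

-- B replaces A's keyword-driven loop of whole-string substring tests with a single
-- position-driven scan testing startswith for each keyword at every position (alternative, same cost).

-- ===== PORT A =====
-- A: loop over the keyword list, return True on the first keyword that is a
-- substring of the lowercased input ('keyword in user_input.lower()').
def aKeywords : List String :=
  ["organize", "summarize", "extract", "filter",
   "create prompt", "update prompt", "delete prompt", "list prompts",
   "create rule", "update rule", "delete rule", "list rules"]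

def aLoop : List String → String → Bool
  | [], _ => false
  | k :: rest, low => if PySem.Str.isIn k low then true else aLoop rest low

def is_babyagi_task_py (user_input : String) : Bool :=
  aLoop aKeywords (PySem.Str.lower user_input)

-- ===== PORT B =====
def bKeywords : List String :=
  ["organize", "summarize", "extract", "filter",
   "create prompt", "update prompt", "delete prompt", "list prompts",
   "create rule", "update rule", "delete rule", "list rules"]

-- B: one pass over the lowercased input; at each position i test whether any
-- keyword starts there ('s.startswith(k, i)' = startswith on the suffix from i).
def is_babyagi_task_py_alt (user_input : String) : Bool :=
  let s := (PySem.Str.lower user_input).toList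
  (List.range (s.length + 1)).any (fun i =>
    bKeywords.any (fun k => PySem.Chars.startswith (s.drop i) k.toList))

-- ===== PRECONDITION & SPEC =====
def Spec_is_babyagi_task_py (user_input : String) (out : Bool) : Prop := out = is_babyagi_task_py_alt user_input
instance (user_input : String) (out : Bool) : Decidable (Spec_is_babyagi_task_py user_input out) := by unfold Spec_is_babyagi_task_py; infer_instance

-- ===== CLAIM (what is proved, stated in full; the proofs are below) =====
def Claim_equal_is_babyagi_task_py : Prop := ∀ (user_input : String), Dom_is_babyagi_task_py user_input → Spec_is_babyagi_task_py user_input (is_babyagi_task_py user_input)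

-- ===== LEMMAS AND PROOFS =====

-- A's early-return loop is the 'any' of the substring tests.
theorem aLoop_eq_any (ks : List String) (low : String) :
    aLoop ks low = ks.any (fun k => PySem.Str.isIn k low) := by
  induction ks with
  | nil => rfl
  | cons k rest ih =>
    simp only [aLoop, List.any_cons, ih]
    cases PySem.Str.isIn k low <;> simp

-- 'k in low' holds iff k starts at some position i ≤ len low (B's per-keyword condition).
theorem isIn_iff_exists_pos (k low : String) :
    PySem.Str.isIn k low = true ↔
      ∃ i ∈ List.range (low.toList.length + 1),
        PySem.Chars.startswith (low.toList.drop i) k.toList = true := by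
  rw [PySem.Str.isIn_iff_infix]
  constructor
  · intro h
    obtain ⟨j, hj⟩ := (PySem.Chars.exists_prefix_drop_iff_isIn k.toList low.toList).2
      ((PySem.Chars.isIn_iff_infix _ _).2 h)
    refine ⟨min j low.toList.length, List.mem_range.2 (by omega), ?_⟩
    rw [PySem.Chars.startswith_iff]
    rcases Nat.le_total j low.toList.length with hle | hge
    · rw [Nat.min_eq_left hle]; exact hj
    · have h1 : low.toList.drop j = [] := List.drop_eq_nil_of_le (by omega)
      have h2 : low.toList.drop (min j low.toList.length) = [] :=
        List.drop_eq_nil_of_le (by omega)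
      rw [h2]; rw [h1] at hj; exact hj
  · rintro ⟨i, _, hi⟩
    rw [PySem.Chars.startswith_iff] at hi
    exact (PySem.Chars.isIn_iff_infix k.toList low.toList).1
      ((PySem.Chars.exists_prefix_drop_iff_isIn k.toList low.toList).1 ⟨i, hi⟩)

-- Swapping the two 'any's: keyword-driven vs position-driven.
theorem any_key_eq_any_pos (ks : List String) (low : String) :
    ks.any (fun k => PySem.Str.isIn k low) =
      (List.range (low.toList.length + 1)).any (fun i =>
        ks.any (fun k => PySem.Chars.startswith (low.toList.drop i) k.toList)) := by
  rw [Bool.eq_iff_iff]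
  simp only [List.any_eq_true]
  constructor
  · rintro ⟨k, hk, hin⟩
    obtain ⟨i, hi, hsw⟩ := (isIn_iff_exists_pos k low).1 hin
    exact ⟨i, hi, ⟨k, hk, hsw⟩⟩
  · rintro ⟨i, hi, k, hk, hsw⟩
    exact ⟨k, hk, (isIn_iff_exists_pos k low).2 ⟨i, hi, hsw⟩⟩

-- ===== VERDICT (by name: the statement is the Claim_ definition above) =====
theorem is_babyagi_task_py_spec : Claim_equal_is_babyagi_task_py := by
  intro u _
  show is_babyagi_task_py u = is_babyagi_task_py_alt u
  unfold is_babyagi_task_py is_babyagi_task_py_alt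
  rw [aLoop_eq_any, show aKeywords = bKeywords from rfl]
  exact any_key_eq_any_pos bKeywords (PySem.Str.lower u)
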